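-- pv_equiv track=rewrite | github.com/tetragrey/Grey_Corner_Python_Fundamentals | fundamentals_one/fundamentals_one_answers.py | problem_eight
-- ===== SOURCE A (Python) =====
-- def problem_eight(mystery_number_list):
--     positives = 0
--     negatives = 0
--     zeroes = 0
--     for mystery_number in mystery_number_list:
--         if mystery_number == 0:
--             zeroes += 1
--         elif mystery_number > 0:
--             positives += 1
--         elif mystery_number < 0:
--             negatives += 1
--     return positives, negatives, zeroes
-- ===== SOURCE B (Python) =====
-- def problem_eight(mystery_number_list):
--     positives = sum(1 for x in mystery_number_list if x > 0)
--     negatives = sum(1 for x in mystery_number_list if x < 0)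
--     zeroes = sum(1 for x in mystery_number_list if x == 0)
--     return positives, negatives, zeroes
-- ===== Notes on version B (the rewrite author's own statement) =====
-- stated objective: simpler
-- what changed: Replaced the single accumulating loop over three counters with three independent one-condition passes (sum of generator expressions), one per count.
import Mathlib
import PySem

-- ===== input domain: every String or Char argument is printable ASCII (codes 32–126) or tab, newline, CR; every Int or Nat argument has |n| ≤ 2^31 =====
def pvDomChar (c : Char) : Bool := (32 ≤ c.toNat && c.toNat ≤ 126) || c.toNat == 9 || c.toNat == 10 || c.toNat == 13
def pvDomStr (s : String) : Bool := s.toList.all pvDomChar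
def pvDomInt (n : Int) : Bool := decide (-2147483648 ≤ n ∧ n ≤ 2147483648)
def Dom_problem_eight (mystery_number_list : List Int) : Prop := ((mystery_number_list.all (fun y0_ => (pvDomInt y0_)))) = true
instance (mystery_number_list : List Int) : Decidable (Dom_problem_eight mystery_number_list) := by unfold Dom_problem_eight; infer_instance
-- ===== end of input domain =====

-- B replaces A's single three-counter loop by three independent single-condition passes; objective: simpler.

-- ===== PORT A =====
-- one fold carrying the three counters, branches in A's order
def problem_eight (mystery_number_list : List Int) : Int × Int × Int :=
  mystery_number_list.foldl
    (fun (acc : Int × Int × Int) (mystery_number : Int) =>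
      let (positives, negatives, zeroes) := acc
      if mystery_number = 0 then (positives, negatives, zeroes + 1)
      else if mystery_number > 0 then (positives + 1, negatives, zeroes)
      else if mystery_number < 0 then (positives, negatives + 1, zeroes)
      else (positives, negatives, zeroes))
    ((0, 0, 0) : Int × Int × Int)

-- ===== PORT B =====
-- three independent passes, each summing 1 over the matching elements
def pvSumIf (xs : List Int) (p : Int → Bool) : Int :=
  xs.foldl (fun acc x => if p x then acc + 1 else acc) 0

def problem_eight_alt (mystery_number_list : List Int) : Int × Int × Int :=
  let positives := pvSumIf mystery_number_list (fun x => x > 0)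
  let negatives := pvSumIf mystery_number_list (fun x => x < 0)
  let zeroes := pvSumIf mystery_number_list (fun x => x = 0)
  (positives, negatives, zeroes)

-- ===== PRECONDITION & SPEC =====
def Spec_problem_eight (mystery_number_list : List Int) (out : Int × Int × Int) : Prop := out = problem_eight_alt mystery_number_list
instance (mystery_number_list : List Int) (out : Int × Int × Int) : Decidable (Spec_problem_eight mystery_number_list out) := by unfold Spec_problem_eight; infer_instance

-- ===== CLAIM (what is proved, stated in full; the proofs are below) =====
def Claim_equal_problem_eight : Prop := ∀ (mystery_number_list : List Int), Dom_problem_eight mystery_number_list → Spec_problem_eight mystery_number_list (problem_eight mystery_number_list)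

-- ===== LEMMAS AND PROOFS =====

theorem pvSumIf_shift (p : Int → Bool) (xs : List Int) (c : Int) :
    xs.foldl (fun acc x => if p x then acc + 1 else acc) c = c + pvSumIf xs p := by
  induction xs generalizing c with
  | nil => simp [pvSumIf]
  | cons a t ih =>
    rw [List.foldl_cons, ih]
    conv_rhs => rw [show pvSumIf (a :: t) p =
      (a :: t).foldl (fun acc x => if p x then acc + 1 else acc) 0 from rfl,
      List.foldl_cons, ih]
    split <;> ring

theorem pvSumIf_cons (p : Int → Bool) (a : Int) (t : List Int) :
    pvSumIf (a :: t) p = (if p a then (1:Int) else 0) + pvSumIf t p := by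
  rw [show pvSumIf (a :: t) p =
    (a :: t).foldl (fun acc x => if p x then acc + 1 else acc) 0 from rfl,
    List.foldl_cons, pvSumIf_shift]
  split <;> ring

-- generalized invariant: A's fold from any start equals start plus B's three counts
theorem problem_eight_fold_eq (xs : List Int) (p n z : Int) :
    xs.foldl
      (fun (acc : Int × Int × Int) (mystery_number : Int) =>
        let (positives, negatives, zeroes) := acc
        if mystery_number = 0 then (positives, negatives, zeroes + 1)
        else if mystery_number > 0 then (positives + 1, negatives, zeroes)
        else if mystery_number < 0 then (positives, negatives + 1, zeroes)
        else (positives, negatives, zeroes))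
      ((p, n, z) : Int × Int × Int)
    = (p + pvSumIf xs (fun x => x > 0), n + pvSumIf xs (fun x => x < 0),
       z + pvSumIf xs (fun x => x = 0)) := by
  induction xs generalizing p n z with
  | nil => simp [pvSumIf]
  | cons a t ih =>
    rw [List.foldl_cons, pvSumIf_cons, pvSumIf_cons, pvSumIf_cons]
    simp only [decide_eq_true_eq]
    split_ifs with h1 h2 h3 <;>
      first
        | (exfalso; omega)
        | (rw [ih]; simp only [Prod.mk.injEq]; refine ⟨by ring, by ring, by ring⟩)

theorem problem_eight_spec : Claim_equal_problem_eight := by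
  intro xs _
  show problem_eight xs = problem_eight_alt xs
  unfold problem_eight problem_eight_alt
  rw [problem_eight_fold_eq]
  simp
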